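-- pv_equiv track=rewrite | github.com/RyanSonder/leetcode | src/problems/defuse_the_bomb/defuse_the_bomb.py | solution
-- ===== SOURCE A (Python) =====
-- def solution(code: [int], k: int):
--     if k == 0:
--         return [0] * len(code)
--
--     elif k < 0:
--         decryption = []
--         for i in range(len(code)):
--             decryption.append(sum(code[k:]))
--             # Rotate the list
--             first = code.pop(0)
--             code.append(first)
--
--         return decryption
--
--     else: # k > 0
--         decryption = []
--         extended = code + code
--         for i in range(len(code)):
--             decryption.append(sum(extended[i+1:i+k+1]))
--         return decryption
-- ===== SOURCE B (Python) =====
-- def solution(code, k):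
--     # O(n) via prefix sums over the doubled list; A is O(n*k). Return value only
--     # (A temporarily rotates `code` in place but restores it before returning).
--     n = len(code)
--     if k == 0:
--         return [0] * n
--     pref = [0]
--     s = 0
--     for x in code + code:
--         s += x
--         pref.append(s)
--     if k > 0:
--         return [pref[min(i + k + 1, 2 * n)] - pref[i + 1] for i in range(n)]
--     m = min(-k, n)
--     return [pref[i + n] - pref[i + n - m] for i in range(n)]
-- ===== Notes on version B (the rewrite author's own statement) =====
-- stated objective: faster
-- what changed: A recomputes a slice sum for every position (rotating the list element-by-element when k<0); B builds one prefix-sum array over the doubled list and returns each window sum as a difference of two prefix sums.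
import Mathlib
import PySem

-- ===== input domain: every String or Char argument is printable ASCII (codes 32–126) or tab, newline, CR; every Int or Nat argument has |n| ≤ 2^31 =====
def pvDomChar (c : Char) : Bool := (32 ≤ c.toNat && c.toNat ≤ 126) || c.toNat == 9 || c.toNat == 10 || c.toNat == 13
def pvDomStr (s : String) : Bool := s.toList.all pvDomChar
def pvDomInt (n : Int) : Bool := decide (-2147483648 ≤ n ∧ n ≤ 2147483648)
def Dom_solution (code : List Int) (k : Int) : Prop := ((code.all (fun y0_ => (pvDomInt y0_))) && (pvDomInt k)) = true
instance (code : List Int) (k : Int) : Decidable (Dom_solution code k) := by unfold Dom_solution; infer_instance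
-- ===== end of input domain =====

-- B replaces A's repeated slice-summing (with list rotation for k<0) by prefix sums
-- over the doubled list; return values proved equal (A rotates `code` in place for k<0
-- but restores it before returning, so no net mutation).


-- ===== PORT A =====
-- the k<0 loop: append sum(code[k:]), then rotate code left by one (pop(0)/append)
def solNegLoop (k : Int) : Nat → List Int → List Int → List Int
  | 0, _, acc => acc
  | n+1, code, acc =>
    let acc' := acc ++ [(PySem.List.slice code (some k) none).sum]
    match PySem.List.pop? code 0 with
    | none => acc'  -- totality guard only: inside the loop code is never empty
    | some (first, rest) => solNegLoop k n (rest ++ [first]) acc'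

def solution (code : List Int) (k : Int) : List Int :=
  if k = 0 then List.replicate code.length 0
  else if k < 0 then solNegLoop k code.length code []
  else
    let extended := code ++ code
    (PySem.List.pyRange 0 code.length 1).foldl
      (fun d i => d ++ [(PySem.List.slice extended (some (i+1)) (some (i+k+1))).sum]) []

-- ===== PORT B =====
def solution_alt (code : List Int) (k : Int) : List Int :=
  let n : Int := code.length
  if k = 0 then List.replicate code.length 0
  else
    let pref := ((code ++ code).foldl
      (fun (st : List Int × Int) x => (st.1 ++ [st.2 + x], st.2 + x)) ([0], 0)).1
    if k > 0 then
      (PySem.List.pyRange 0 n 1).map (fun i =>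
        PySem.List.pyGetD pref (min (i + k + 1) (2 * n)) 0 - PySem.List.pyGetD pref (i + 1) 0)
    else
      let m := min (-k) n
      (PySem.List.pyRange 0 n 1).map (fun i =>
        PySem.List.pyGetD pref (i + n) 0 - PySem.List.pyGetD pref (i + n - m) 0)

-- ===== PRECONDITION & SPEC =====
def Spec_solution (code : List Int) (k : Int) (out : List Int) : Prop := out = solution_alt code k
instance (code : List Int) (k : Int) (out : List Int) : Decidable (Spec_solution code k out) := by unfold Spec_solution; infer_instance

-- ===== CLAIM (what is proved, stated in full; the proofs are below) =====
def Claim_equal_solution : Prop := ∀ (code : List Int) (k : Int), Dom_solution code k → Spec_solution code k (solution code k)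

-- ===== LEMMAS AND PROOFS =====

-- B's prefix list, characterised: entry j is the sum of the first j elements
theorem pref_go (D : List Int) : ∀ (L : List Int) (s : Int),
    (D.foldl (fun (st : List Int × Int) x => (st.1 ++ [st.2 + x], st.2 + x)) (L, s)).1
      = L ++ (List.range D.length).map (fun j => s + (D.take (j+1)).sum) := by
  induction D with
  | nil => simp
  | cons x D ih =>
    intro L s
    simp only [List.foldl_cons, List.length_cons, List.range_succ_eq_map, List.map_cons,
      List.map_map, ih]
    simp [Function.comp, add_assoc, List.append_assoc]

theorem pref_eq (D : List Int) :
    ((D.foldl (fun (st : List Int × Int) x => (st.1 ++ [st.2 + x], st.2 + x)) ([0], 0)).1)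
      = (List.range (D.length + 1)).map (fun j => (D.take j).sum) := by
  rw [pref_go]
  simp [List.range_succ_eq_map, Function.comp]

-- indexing B's prefix list is a take-sum
theorem pref_get (D : List Int) (j : Int) (h0 : 0 ≤ j) (h1 : j ≤ D.length) :
    PySem.List.pyGetD
      ((D.foldl (fun (st : List Int × Int) x => (st.1 ++ [st.2 + x], st.2 + x)) ([0], 0)).1)
      j 0 = (D.take j.toNat).sum := by
  rw [pref_eq, PySem.List.pyGetD_eq_getElem _ _ h0 (by simp; omega)]
  simp

-- sum of a clipped window as a difference of take-sums (no side conditions)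
theorem sum_take_drop (D : List Int) (a t : Nat) :
    ((D.drop a).take t).sum = (D.take (min (a + t) D.length)).sum - (D.take a).sum := by
  by_cases h : a ≤ D.length
  · have hmin : min (a + t) D.length = a + min t (D.length - a) := by omega
    rw [hmin, List.take_add, List.sum_append]
    have : (D.drop a).take (min t (D.length - a)) = (D.drop a).take t := by
      rw [List.take_eq_take_iff]; simp
    rw [this]; ring
  · have h1 : D.drop a = [] := by simp; omega
    have h2 : D.take a = D := List.take_of_length_le (by omega)
    have h3 : min (a + t) D.length = D.length := by omega
    simp [h1, h2, h3]

-- one Python rotation step (pop(0)+append), iterated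
theorem rot_iter (c : List Int) : ∀ (j : Nat), j ≤ c.length →
    (fun l : List Int => l.drop 1 ++ l.take 1)^[j] c = c.drop j ++ c.take j := by
  intro j
  induction j with
  | zero => simp
  | succ j ih =>
    intro hj
    rw [Function.iterate_succ_apply', ih (by omega)]
    have hlt : j < c.length := by omega
    rw [List.drop_eq_getElem_cons hlt]
    simp only [List.cons_append, List.drop_succ_cons, List.take_zero, List.take_add_one,
      List.getElem?_eq_getElem hlt]
    simp [List.append_assoc]

-- a rotation of c is a length-|c| window of the doubled list
theorem rot_as_window (c : List Int) (j : Nat) (hj : j ≤ c.length) :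
    c.drop j ++ c.take j = ((c ++ c).drop j).take c.length := by
  rw [List.drop_append]
  have h0 : j - c.length = 0 := by omega
  rw [h0, List.drop_zero, List.take_append]
  have h1 : (c.drop j).take c.length = c.drop j := List.take_of_length_le (by simp)
  rw [h1]
  congr 1
  simp
  omega

-- unfolding A's negative-k loop into a map over rotations
theorem solNegLoop_eq (k : Int) : ∀ (cnt : Nat) (c acc : List Int), c ≠ [] →
    solNegLoop k cnt c acc = acc ++ (List.range cnt).map
      (fun j => (PySem.List.slice ((fun l : List Int => l.drop 1 ++ l.take 1)^[j] c) (some k) none).sum) := by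
  intro cnt
  induction cnt with
  | zero => simp [solNegLoop]
  | succ n ih =>
    intro c acc hc
    obtain ⟨x, rest, rfl⟩ := List.exists_cons_of_ne_nil hc
    rw [solNegLoop]
    simp only [PySem.List.pop?_zero_cons]
    rw [ih (rest ++ [x]) _ (by simp)]
    rw [List.range_succ_eq_map]
    simp only [List.map_cons, List.map_map, Function.iterate_zero_apply, List.append_assoc]
    congr 1

-- ===== VERDICT (by name: the statement is the Claim_ definition above) =====
theorem solution_spec : Claim_equal_solution := by
  intro code k _
  unfold Spec_solution solution solution_alt
  by_cases hk0 : k = 0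
  · simp [hk0]
  · simp only [if_neg hk0]
    by_cases hkpos : k > 0
    · -- k > 0 branch
      simp only [if_pos hkpos, if_neg (by omega : ¬ k < 0)]
      rw [PySem.List.foldl_append_singleton_eq_map]
      apply List.map_congr_left
      intro i hi
      obtain ⟨hi0, hin⟩ := (PySem.List.mem_pyRange_one).1 hi
      rw [PySem.List.slice_toNat _ (by omega) (by omega), sum_take_drop,
        pref_get _ _ (by omega) (by simp; omega),
        pref_get _ _ (by omega) (by simp; omega)]
      have harg : min ((i+1).toNat + ((i+k+1).toNat - (i+1).toNat)) (code ++ code).length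
          = (min (i + k + 1) (2 * (code.length : Int))).toNat := by
        simp only [List.length_append]; omega
      rw [harg]
    · -- k < 0 branch
      have hkneg : k < 0 := by omega
      simp only [if_pos hkneg, if_neg hkpos]
      by_cases hc : code = []
      · simp [hc, solNegLoop]
      · rw [solNegLoop_eq k code.length code [] hc, List.nil_append,
          PySem.List.pyRange_one]
        simp only [sub_zero, Int.toNat_natCast, List.map_map]
        apply List.map_congr_left
        intro j hj
        have hjn : j < code.length := List.mem_range.1 hj
        simp only [Function.comp, zero_add]
        rw [rot_iter code j (by omega), rot_as_window code j (by omega)]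
        have hm0 : k = -(((-k).toNat : Nat) : Int) := by omega
        rw [hm0, PySem.List.slice_from_neg_natCast _ _ (by omega)]
        simp only [neg_neg]
        have hlen : ((((code ++ code).drop j).take code.length)).length = code.length := by
          simp; omega
        rw [hlen, List.drop_take, List.drop_drop, sum_take_drop,
          pref_get _ _ (by omega) (by simp; omega),
          pref_get _ _ (by omega) (by simp; omega)]
        have h1 : min (j + (code.length - (-k).toNat) + (code.length - (code.length - (-k).toNat)))
            (code ++ code).length = ((j : Int) + code.length).toNat := by
          simp only [List.length_append]; omega
        have h2 : j + (code.length - (-k).toNat)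
            = ((j : Int) + code.length - min (((-k).toNat : Nat) : Int) (code.length : Int)).toNat := by
          omega
        rw [h1, h2]
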